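-- pv_equiv track=rewrite | github.com/pleisto/yuren-13b | apps/webui/src/webui/utils.py | is_stop_word_or_prefix
-- ===== SOURCE A (Python) =====
-- def is_stop_word_or_prefix(s: str, stop_words: list) -> bool:
--     for stop_word in stop_words:
--         if s.endswith(stop_word):
--             return True
--         for i in range(1, len(stop_word)):
--             if s.endswith(stop_word[:i]):
--                 return True
--     return False
-- ===== SOURCE B (Python) =====
-- def is_stop_word_or_prefix(s: str, stop_words: list) -> bool:
--     if not stop_words:
--         return False
--     if "" in stop_words:
--         return True
--     start = max(0, len(s) - max(len(w) for w in stop_words))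
--     for j in range(len(s) - 1, start - 1, -1):
--         suf = s[j:]
--         if any(w.startswith(suf) for w in stop_words):
--             return True
--     return False
-- ===== Notes on version B (the rewrite author's own statement) =====
-- stated objective: alternative
-- what changed: Instead of enumerating every prefix of every stop word and calling s.endswith on each, B scans once over the at most maxL relevant suffixes of s (longest first) and asks whether any stop word starts with that suffix, with an up-front check for an empty stop word; the per-word prefix enumeration disappears.
import Mathlib
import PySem

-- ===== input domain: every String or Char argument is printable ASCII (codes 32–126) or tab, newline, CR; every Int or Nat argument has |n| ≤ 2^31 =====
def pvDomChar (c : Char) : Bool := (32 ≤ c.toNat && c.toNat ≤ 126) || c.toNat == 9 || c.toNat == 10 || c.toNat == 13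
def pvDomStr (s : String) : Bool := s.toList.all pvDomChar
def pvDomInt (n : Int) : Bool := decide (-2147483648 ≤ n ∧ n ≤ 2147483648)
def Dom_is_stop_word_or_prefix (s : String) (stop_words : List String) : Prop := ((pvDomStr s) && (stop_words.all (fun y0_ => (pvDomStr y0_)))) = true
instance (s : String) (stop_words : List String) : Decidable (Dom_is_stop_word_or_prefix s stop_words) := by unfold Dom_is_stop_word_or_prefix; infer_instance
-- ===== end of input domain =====

-- B replaces A's per-word enumeration of word prefixes (endswith on each one) by a single
-- scan over the at most maxL relevant suffixes of s, asking whether any stop word starts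
-- with that suffix: a genuinely different traversal (suffixes of s vs prefixes of each word).

-- ===== PORT A =====
-- inner loop: 'for i in range(1, len(stop_word)): if s.endswith(stop_word[:i]): return True'
def pvAInner (s w : List Char) : List Int → Bool
  | [] => false
  | i :: rest =>
    if PySem.Chars.endswith s (PySem.List.slice w none (some i)) then true
    else pvAInner s w rest

-- outer loop over the stop words
def pvAOuter (s : List Char) : List (List Char) → Bool
  | [] => false
  | w :: rest =>
    if PySem.Chars.endswith s w then true
    else if pvAInner s w (PySem.List.pyRange 1 (w.length : Int) 1) then true
    else pvAOuter s rest

def is_stop_word_or_prefix (s : String) (stop_words : List String) : Bool :=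
  pvAOuter s.toList (stop_words.map String.toList)

-- ===== PORT B =====
-- loop: 'for j in range(len(s)-1, start-1, -1): if any(w.startswith(s[j:]) ...): return True'
def pvBLoop (s : List Char) (ws : List (List Char)) : List Int → Bool
  | [] => false
  | j :: rest =>
    if ws.any (fun w => PySem.Chars.startswith w (PySem.List.slice s (some j) none)) then true
    else pvBLoop s ws rest

def pvBMain (s : List Char) (ws : List (List Char)) : Bool :=
  match ws with
  | [] => false                                  -- 'if not stop_words: return False'
  | _ :: _ =>
    if ws.contains ([] : List Char) then true    -- 'if "" in stop_words: return True'
    else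
      -- 'max(len(w) for w in stop_words)' (nonempty list of lengths)
      let maxL : Int := (ws.map (fun w => (w.length : Int))).foldl max 0
      let start : Int := max 0 ((s.length : Int) - maxL)
      pvBLoop s ws (PySem.List.pyRange ((s.length : Int) - 1) (start - 1) (-1))

def is_stop_word_or_prefix_alt (s : String) (stop_words : List String) : Bool :=
  pvBMain s.toList (stop_words.map String.toList)

-- ===== PRECONDITION & SPEC =====
def Spec_is_stop_word_or_prefix (s : String) (stop_words : List String) (out : Bool) : Prop := out = is_stop_word_or_prefix_alt s stop_words
instance (s : String) (stop_words : List String) (out : Bool) : Decidable (Spec_is_stop_word_or_prefix s stop_words out) := by unfold Spec_is_stop_word_or_prefix; infer_instance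

-- ===== CLAIM (what is proved, stated in full; the proofs are below) =====
def Claim_equal_is_stop_word_or_prefix : Prop := ∀ (s : String) (stop_words : List String), Dom_is_stop_word_or_prefix s stop_words → Spec_is_stop_word_or_prefix s stop_words (is_stop_word_or_prefix s stop_words)

-- ===== LEMMAS AND PROOFS =====

-- the common characterisation: some stop word is empty, or some nonempty prefix of a stop
-- word (including the word itself) is a suffix of s
def pvGood (s : List Char) (ws : List (List Char)) : Prop :=
  ∃ w ∈ ws, w = [] ∨ ∃ k : Nat, 1 ≤ k ∧ k ≤ w.length ∧ (w.take k) <:+ s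

lemma pvAInner_iff (s w : List Char) (js : List Int) :
    pvAInner s w js = true ↔
      ∃ i ∈ js, PySem.Chars.endswith s (PySem.List.slice w none (some i)) = true := by
  induction js with
  | nil => simp [pvAInner]
  | cons j rest ih =>
    simp only [pvAInner]
    split_ifs with h
    · simp [h]
    · simp [ih, h]

lemma pvAInner_range_iff (s w : List Char) :
    pvAInner s w (PySem.List.pyRange 1 (w.length : Int) 1) = true ↔
      ∃ k : Nat, 1 ≤ k ∧ k < w.length ∧ (w.take k) <:+ s := by
  rw [pvAInner_iff]
  constructor
  · rintro ⟨i, hi, hend⟩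
    rw [PySem.List.mem_pyRange_one] at hi
    obtain ⟨h1, h2⟩ := hi
    refine ⟨i.toNat, by omega, by omega, ?_⟩
    rw [PySem.List.slice_to w (by omega)] at hend
    exact (PySem.Chars.endswith_iff _ _).mp hend
  · rintro ⟨k, h1, h2, hsuf⟩
    refine ⟨(k : Int), ?_, ?_⟩
    · rw [PySem.List.mem_pyRange_one]; omega
    · rw [PySem.List.slice_to w (by omega)]
      simpa using (PySem.Chars.endswith_iff s (w.take k)).mpr hsuf

lemma pvAOuter_iff (s : List Char) (ws : List (List Char)) :
    pvAOuter s ws = true ↔ pvGood s ws := by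
  induction ws with
  | nil => simp [pvAOuter, pvGood]
  | cons w rest ih =>
    simp only [pvAOuter]
    have hw : (PySem.Chars.endswith s w = true ∨
        pvAInner s w (PySem.List.pyRange 1 (w.length : Int) 1) = true) ↔
        (w = [] ∨ ∃ k : Nat, 1 ≤ k ∧ k ≤ w.length ∧ (w.take k) <:+ s) := by
      rw [PySem.Chars.endswith_iff, pvAInner_range_iff]
      constructor
      · rintro (hfull | ⟨k, h1, h2, h3⟩)
        · rcases eq_or_ne w [] with h | h
          · exact Or.inl h
          · exact Or.inr ⟨w.length, by
              have : 0 < w.length := List.length_pos_iff.mpr h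
              omega, le_refl _, by simpa using hfull⟩
        · exact Or.inr ⟨k, h1, le_of_lt h2, h3⟩
      · rintro (h | ⟨k, h1, h2, h3⟩)
        · subst h; exact Or.inl (List.nil_suffix)
        · rcases eq_or_lt_of_le h2 with h | h
          · subst h; exact Or.inl (by simpa using h3)
          · exact Or.inr ⟨k, h1, h, h3⟩
    constructor
    · intro h
      split_ifs at h with h1 h2
      · exact ⟨w, List.mem_cons_self, hw.mp (Or.inl h1)⟩
      · exact ⟨w, List.mem_cons_self, hw.mp (Or.inr h2)⟩
      · obtain ⟨w', hmem, hw'⟩ := ih.mp h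
        exact ⟨w', List.mem_cons_of_mem _ hmem, hw'⟩
    · rintro ⟨w', hmem, hw'⟩
      rcases List.mem_cons.mp hmem with rfl | hmem'
      · rcases hw.mpr hw' with h | h
        · simp [h]
        · split_ifs <;> simp_all
      · split_ifs with h1 h2
        · rfl
        · rfl
        · exact ih.mpr ⟨w', hmem', hw'⟩

lemma pvBLoop_iff (s : List Char) (ws : List (List Char)) (js : List Int) :
    pvBLoop s ws js = true ↔
      ∃ j ∈ js, ∃ w ∈ ws, PySem.Chars.startswith w (PySem.List.slice s (some j) none) = true := by
  induction js with
  | nil => simp [pvBLoop]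
  | cons j rest ih =>
    simp only [pvBLoop]
    split_ifs with h
    · simp only [List.any_eq_true] at h
      obtain ⟨w, hw, hs⟩ := h
      simp only [true_iff]
      exact ⟨j, List.mem_cons_self, w, hw, hs⟩
    · rw [ih]
      simp only [List.any_eq_true] at h
      constructor
      · rintro ⟨j', hj', hrest⟩
        exact ⟨j', List.mem_cons_of_mem _ hj', hrest⟩
      · rintro ⟨j', hj', w, hw, hs⟩
        rcases List.mem_cons.mp hj' with rfl | hj''
        · exact absurd ⟨w, hw, hs⟩ h
        · exact ⟨j', hj'', w, hw, hs⟩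

-- every stop word's length is at most the folded maximum
lemma pvLen_le_maxL (ws : List (List Char)) (w : List Char) (hw : w ∈ ws) :
    (w.length : Int) ≤ (ws.map (fun w => (w.length : Int))).foldl max 0 :=
  (PySem.List.le_foldl_max _ _).2 _ (List.mem_map_of_mem hw)

lemma pvBMain_iff (s : List Char) (ws : List (List Char)) :
    pvBMain s ws = true ↔ pvGood s ws := by
  match ws with
  | [] => simp [pvBMain, pvGood]
  | w0 :: rest =>
    set ws := w0 :: rest with hws
    simp only [pvBMain]
    split_ifs with hempty
    · have : ([] : List Char) ∈ ws := by simpa using hempty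
      exact iff_of_true rfl ⟨[], this, Or.inl rfl⟩
    · have hnotin : ([] : List Char) ∉ ws := by simpa using hempty
      rw [pvBLoop_iff]
      set maxL : Int := (ws.map (fun w => (w.length : Int))).foldl max 0 with hmaxL
      set start : Int := max 0 ((s.length : Int) - maxL) with hstart
      constructor
      · rintro ⟨j, hj, w, hw, hsw⟩
        rw [PySem.List.mem_pyRange_neg_one] at hj
        have hj0 : 0 ≤ j := by
          have : 0 ≤ start := le_max_left _ _
          omega
        have hjlt : j.toNat < s.length := by omega
        rw [PySem.List.slice_from s hj0] at hsw
        have hpre : s.drop j.toNat <+: w := (PySem.Chars.startswith_iff w _).mp hsw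
        refine ⟨w, hw, Or.inr ⟨s.length - j.toNat, by omega, ?_, ?_⟩⟩
        · have := hpre.length_le
          simpa [List.length_drop] using this
        · have htake : w.take (s.drop j.toNat).length = s.drop j.toNat :=
            (List.prefix_iff_eq_take.mp hpre).symm
          rw [List.length_drop] at htake
          rw [htake]
          exact List.drop_suffix _ _
      · rintro ⟨w, hw, h | ⟨k, h1, h2, h3⟩⟩
        · exact absurd (h ▸ hw) hnotin
        · have hks : k ≤ s.length := by
            have := h3.length_le
            simpa [List.length_take, min_eq_left h2] using this
          have hmax : (w.length : Int) ≤ maxL := pvLen_le_maxL ws w hw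
          refine ⟨((s.length - k : Nat) : Int), ?_, w, hw, ?_⟩
          · rw [PySem.List.mem_pyRange_neg_one]
            constructor
            · have : start ≤ (s.length : Int) - (k : Int) := by
                apply max_le <;> omega
              omega
            · omega
          · rw [PySem.List.slice_from s (by positivity)]
            rw [PySem.Chars.startswith_iff]
            have hdrop : s.drop (s.length - k) = w.take k := by
              have := (List.suffix_iff_eq_drop.mp h3).symm
              rwa [List.length_take, min_eq_left h2] at this
            simp only [Int.toNat_natCast]
            rw [hdrop]
            exact List.take_prefix _ _
-- ===== VERDICT (by name: the statement is the Claim_ definition above) =====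
theorem is_stop_word_or_prefix_spec : Claim_equal_is_stop_word_or_prefix := by
  intro s stop_words _
  unfold Spec_is_stop_word_or_prefix is_stop_word_or_prefix is_stop_word_or_prefix_alt
  have hA := pvAOuter_iff s.toList (stop_words.map String.toList)
  have hB := pvBMain_iff s.toList (stop_words.map String.toList)
  by_cases h : pvGood s.toList (stop_words.map String.toList)
  · rw [hA.mpr h, hB.mpr h]
  · rcases Bool.eq_false_or_eq_true (pvAOuter s.toList (stop_words.map String.toList)) with hA' | hA'
    · exact absurd (hA.mp hA') h
    · rcases Bool.eq_false_or_eq_true (pvBMain s.toList (stop_words.map String.toList)) with hB' | hB'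
      · exact absurd (hB.mp hB') h
      · rw [hA', hB']
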